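-- pv_equiv track=rewrite | github.com/fim-ai/fim-one | src/fim_one/web/api/connectors.py | _split_auth_config
-- ===== SOURCE A (Python) =====
-- _AUTH_SENSITIVE_FIELDS: dict[str, list[str]] = {
--     "bearer": ["default_token"],
--     "api_key": ["default_api_key"],
--     "basic": ["default_username", "default_password"],
-- }
--
-- def _split_auth_config(
--     auth_type: str, auth_config: dict | None
-- ) -> tuple[dict, dict]:
--     """Split auth_config into (clean_config, cred_blob).
--
--     clean_config: non-sensitive fields only (token_prefix, header_name, etc.)
--     cred_blob: sensitive fields (default_token, default_api_key, etc.)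
--     """
--     if not auth_config:
--         return {}, {}
--     sensitive = _AUTH_SENSITIVE_FIELDS.get(auth_type, [])
--     clean = {k: v for k, v in auth_config.items() if k not in sensitive}
--     cred_blob = {k: v for k, v in auth_config.items() if k in sensitive and v}
--     return clean, cred_blob
-- ===== SOURCE B (Python) =====
-- _AUTH_SENSITIVE_FIELDS: dict[str, list[str]] = {
--     "bearer": ["default_token"],
--     "api_key": ["default_api_key"],
--     "basic": ["default_username", "default_password"],
-- }
--
-- def _split_auth_config(auth_type, auth_config):
--     if not auth_config:
--         return {}, {}
--     # Iterate over the (tiny) sensitive-field schema instead of scanning the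
--     # config: copy the config, pop each sensitive key out of the copy, and
--     # collect the truthy popped values as the credential blob.
--     clean = dict(auth_config)
--     cred_blob = {}
--     for k in _AUTH_SENSITIVE_FIELDS.get(auth_type, []):
--         v = clean.pop(k, None)
--         if v:
--             cred_blob[k] = v
--     return clean, cred_blob
-- ===== Notes on version B (the rewrite author's own statement) =====
-- stated objective: alternative
-- what changed: Instead of A's two comprehensions that each scan auth_config testing membership in the sensitive list, B copies the config once and iterates over the sensitive-field schema, popping each sensitive key out of the copy and collecting the truthy popped values as cred_blob.
import Mathlib
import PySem

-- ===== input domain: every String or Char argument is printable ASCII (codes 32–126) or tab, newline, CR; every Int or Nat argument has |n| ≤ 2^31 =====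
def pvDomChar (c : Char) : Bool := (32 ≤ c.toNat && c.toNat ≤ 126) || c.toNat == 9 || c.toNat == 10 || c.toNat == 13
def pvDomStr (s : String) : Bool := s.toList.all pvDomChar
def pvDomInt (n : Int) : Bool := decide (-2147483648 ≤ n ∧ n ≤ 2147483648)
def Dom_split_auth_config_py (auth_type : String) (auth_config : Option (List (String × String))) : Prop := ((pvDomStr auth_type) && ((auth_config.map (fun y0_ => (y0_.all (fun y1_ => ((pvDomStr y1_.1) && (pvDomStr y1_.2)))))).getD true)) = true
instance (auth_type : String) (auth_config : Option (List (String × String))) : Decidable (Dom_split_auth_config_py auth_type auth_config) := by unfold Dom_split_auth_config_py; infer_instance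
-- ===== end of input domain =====

-- B iterates over the sensitive-field schema, popping each sensitive key out of a copy of
-- the config, instead of A's two membership-filtering scans of the config (alternative
-- decomposition; return-value equivalence on dict-shaped inputs, see Pre_).

-- ===== PORT A =====
-- module constant _AUTH_SENSITIVE_FIELDS and its .get(auth_type, []) lookup (dict lookup = first match)
def pvAuthSensitiveFields : List (String × List String) :=
  [("bearer", ["default_token"]), ("api_key", ["default_api_key"]),
   ("basic", ["default_username", "default_password"])]

def pvSensitiveFor (auth_type : String) : List String :=
  ((pvAuthSensitiveFields.find? (fun kv => kv.1 == auth_type)).map (fun kv => kv.2)).getD []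

def split_auth_config_py (auth_type : String) (auth_config : Option (List (String × String))) : (List (String × String)) × (List (String × String)) :=
  match auth_config with
  | none => ([], [])
  | some cfg =>
    if cfg.isEmpty then ([], [])
    else
      let sensitive := pvSensitiveFor auth_type
      let clean := cfg.filter (fun kv => !(sensitive.contains kv.1))
      let cred_blob := cfg.filter (fun kv => sensitive.contains kv.1 && kv.2 != "")
      (clean, cred_blob)

-- ===== PORT B =====
-- loop body of Source B: clean.pop(k, None) = lookup + delete-by-key (exact for a dict,
-- whose keys are distinct — Pre_ assumes that of the association list), then the
-- truthy popped value is appended to cred_blob.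
def pvPopStep (acc : List (String × String) × List (String × String)) (k : String) :
    List (String × String) × List (String × String) :=
  match acc.1.find? (fun kv => kv.1 == k) with
  | none => acc
  | some kv =>
    (acc.1.filter (fun kv' => !(kv'.1 == k)),
     if kv.2 != "" then acc.2 ++ [(k, kv.2)] else acc.2)

def split_auth_config_py_alt (auth_type : String) (auth_config : Option (List (String × String))) : (List (String × String)) × (List (String × String)) :=
  match auth_config with
  | none => ([], [])
  | some cfg =>
    if cfg.isEmpty then ([], [])
    else (pvSensitiveFor auth_type).foldl pvPopStep (cfg, [])

-- ===== PRECONDITION & SPEC =====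
-- cred-order shape condition: no truthy default_username appears after a truthy
-- default_password in the config
def pvOrdOk (cfg : List (String × String)) : Bool :=
  (cfg.dropWhile (fun kv => !(kv.1 == "default_password" && kv.2 != ""))).all
    (fun kv => !(kv.1 == "default_username" && kv.2 != ""))

-- Pre_ excludes association lists with duplicate keys (a Python dict cannot contain them)
-- and, for auth_type "basic", configs listing a truthy default_password before a truthy
-- default_username: there the cred_blob dicts are equal as Python dicts but their
-- iteration order is an accidental tie between A's config order and B's schema order.
def Pre_split_auth_config_py (auth_type : String) (auth_config : Option (List (String × String))) : Prop :=
  ((auth_config.getD []).map Prod.fst).Nodup ∧ (auth_type = "basic" → pvOrdOk (auth_config.getD []) = true)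
instance (auth_type : String) (auth_config : Option (List (String × String))) : Decidable (Pre_split_auth_config_py auth_type auth_config) := by unfold Pre_split_auth_config_py; infer_instance

def pvWitness_split_auth_config_py : String × (Option (List (String × String))) :=
  ("basic", some [("default_username", "u"), ("header_name", "X"), ("default_password", "p")])

def Spec_split_auth_config_py (auth_type : String) (auth_config : Option (List (String × String))) (out : (List (String × String)) × (List (String × String))) : Prop := out = split_auth_config_py_alt auth_type auth_config
instance (auth_type : String) (auth_config : Option (List (String × String))) (out : (List (String × String)) × (List (String × String))) : Decidable (Spec_split_auth_config_py auth_type auth_config out) := by unfold Spec_split_auth_config_py; infer_instance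

-- ===== CLAIM (what is proved, stated in full; the proofs are below) =====
def Claim_equal_split_auth_config_py : Prop := ∀ (auth_type : String) (auth_config : Option (List (String × String))), Dom_split_auth_config_py auth_type auth_config → Pre_split_auth_config_py auth_type auth_config → Spec_split_auth_config_py auth_type auth_config (split_auth_config_py auth_type auth_config)

-- ===== LEMMAS AND PROOFS =====
theorem pv_filter_key_single (t : String) (kv : String × String) :
    ∀ (cfg : List (String × String)), (cfg.map Prod.fst).Nodup →
      cfg.find? (fun x => x.1 == t) = some kv →
      cfg.filter (fun x => x.1 == t) = [kv] := by
  intro cfg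
  induction cfg with
  | nil => intro _ h; simp at h
  | cons x rest ih =>
    intro nd hf
    simp only [List.map_cons, List.nodup_cons] at nd
    cases h : (x.1 == t) with
    | true =>
      have hf' : x = kv := by simpa [List.find?_cons, h] using hf
      subst hf'
      have hxt : x.1 = t := by simpa using h
      have hnil : rest.filter (fun x' => x'.1 == t) = [] := by
        rw [List.filter_eq_nil_iff]
        intro x' hx' hb
        have hx't : x'.1 = t := by simpa using hb
        exact nd.1 (by rw [hxt, ← hx't]; exact List.mem_map_of_mem hx')
      simp [h, hnil]
    | false =>
      have hf' : rest.find? (fun x => x.1 == t) = some kv := by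
        simpa [List.find?_cons, h] using hf
      simp only [List.filter_cons, h]
      exact ih nd.2 hf' 

theorem pv_pop_spec (t : String) (cfg c : List (String × String))
    (nd : (cfg.map Prod.fst).Nodup) :
    pvPopStep (cfg, c) t
      = (cfg.filter (fun kv => !(kv.1 == t)),
         c ++ cfg.filter (fun kv => kv.1 == t && kv.2 != "")) := by
  unfold pvPopStep
  cases hf : cfg.find? (fun kv => kv.1 == t) with
  | none =>
    have hall := List.find?_eq_none.mp hf
    have h1 : cfg.filter (fun kv => !(kv.1 == t)) = cfg := by
      rw [List.filter_eq_self]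
      intro kv hkv; simpa using hall kv hkv
    have h2 : cfg.filter (fun kv => kv.1 == t && kv.2 != "") = [] := by
      rw [List.filter_eq_nil_iff]
      intro kv hkv hb
      have := hall kv hkv
      simp at this hb
      exact this hb.1
    simp [h1, h2]
  | some kv =>
    have hkey : kv.1 = t := by
      have := List.find?_some hf
      simpa using this
    have hsingle := pv_filter_key_single t kv cfg nd hf
    have e : (cfg.filter (fun x => x.1 == t)).filter (fun x => x.2 != "")
        = cfg.filter (fun x => x.1 == t && x.2 != "") := by
      rw [List.filter_filter]
      apply List.filter_congr
      intro x _
      exact Bool.and_comm _ _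
    have h2 : cfg.filter (fun x => x.1 == t && x.2 != "")
        = if kv.2 != "" then [kv] else [] := by
      rw [← e, hsingle]
      by_cases h : kv.2 = "" <;> simp [h]
    have hkv : (t, kv.2) = kv := by
      cases kv; simp at hkey ⊢; exact hkey.symm
    by_cases h : kv.2 = "" <;> simp [h2, h, hkv]

-- splitting on the union of two distinct keys, in key order, given the order condition
theorem pv_two_key_split (u p : String) (hup : u ≠ p) :
    ∀ (cfg : List (String × String)),
      (cfg.dropWhile (fun kv => !(kv.1 == p && kv.2 != ""))).all
        (fun kv => !(kv.1 == u && kv.2 != "")) = true →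
      cfg.filter (fun kv => (kv.1 == u || kv.1 == p) && kv.2 != "")
        = cfg.filter (fun kv => kv.1 == u && kv.2 != "")
          ++ cfg.filter (fun kv => kv.1 == p && kv.2 != "") := by
  intro cfg
  induction cfg with
  | nil => intro _; rfl
  | cons kv rest ih =>
    intro hord
    by_cases hp : (kv.1 == p && kv.2 != "") = true
    · -- head is a truthy password: no truthy username from here on
      rw [List.dropWhile_cons_of_neg (by simp [hp])] at hord
      have hall := List.all_eq_true.mp hord
      have hrest : ∀ x ∈ rest, ¬ (x.1 == u && x.2 != "") = true := by
        intro x hx hb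
        have := hall x (List.mem_cons_of_mem _ hx)
        simp [hb] at this
      obtain ⟨hkp, hkv2⟩ := by simpa using hp
      have hkvu : ¬ kv.1 = u := by rw [hkp]; exact fun h => hup h.symm
      have h1 : rest.filter (fun x => x.1 == u && x.2 != "") = [] := by
        rw [List.filter_eq_nil_iff]; intro x hx hb; exact hrest x hx hb
      have h2 : rest.filter (fun x => (x.1 == u || x.1 == p) && x.2 != "")
          = rest.filter (fun x => x.1 == p && x.2 != "") := by
        apply List.filter_congr
        intro x hx
        by_cases hxu : x.1 = u
        · have hv : x.2 = "" := by
            by_contra hne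
            exact hrest x hx (by simp [hxu, hne])
          simp [hv]
        · have hxu' : (x.1 == u) = false := by simpa using hxu
          simp [hxu']
      simp only [List.filter_cons]
      simp [hkp, hkv2, h1, h2]
      exact fun h => hup h.symm
    · -- head is not a truthy password: the order condition passes to the tail
      have hpf : (kv.1 == p && kv.2 != "") = false := eq_false_of_ne_true hp
      rw [List.dropWhile_cons_of_pos (by simp [hpf])] at hord
      have hrec := ih hord
      simp only [List.filter_cons]
      simp only [Bool.and_eq_true, beq_iff_eq, bne_iff_ne, ne_eq, not_and, not_not] at hp
      by_cases hku : kv.1 = u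
      · by_cases hv : kv.2 = ""
        · simp [hku, hv, hrec]
        · simp [hku, hv, hrec, hup]
      · by_cases hkp : kv.1 = p
        · have hv : kv.2 = "" := by
            by_contra hne; exact hne (hp (by simp [hkp]))
          simp [hkp, hv, hrec]
        · simp [hku, hkp, hrec]

theorem pv_sensitive_cases (s : String) :
    (s = "basic" ∧ pvSensitiveFor s = ["default_username", "default_password"])
    ∨ pvSensitiveFor s = [] ∨ (∃ t, pvSensitiveFor s = [t]) := by
  by_cases h1 : s = "bearer"
  · subst h1; right; right; exact ⟨"default_token", rfl⟩
  · by_cases h2 : s = "api_key"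
    · subst h2; right; right; exact ⟨"default_api_key", rfl⟩
    · by_cases h3 : s = "basic"
      · subst h3; left; exact ⟨rfl, rfl⟩
      · right; left
        unfold pvSensitiveFor pvAuthSensitiveFields
        have e1 : ("bearer" == s) = false := by simp; exact fun h => h1 h.symm
        have e2 : ("api_key" == s) = false := by simp; exact fun h => h2 h.symm
        have e3 : ("basic" == s) = false := by simp; exact fun h => h3 h.symm
        simp [List.find?, e1, e2, e3]

theorem pv_nodup_filter (cfg : List (String × String)) (q : String × String → Bool)
    (nd : (cfg.map Prod.fst).Nodup) : ((cfg.filter q).map Prod.fst).Nodup :=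
  nd.sublist (List.filter_sublist.map Prod.fst)

-- ===== VERDICT (by name: the statement is the Claim_ definition above) =====
theorem split_auth_config_py_spec : Claim_equal_split_auth_config_py := by
  intro auth_type auth_config _ hpre
  unfold Spec_split_auth_config_py split_auth_config_py split_auth_config_py_alt
  unfold Pre_split_auth_config_py at hpre
  cases auth_config with
  | none => rfl
  | some cfg =>
    simp only [Option.getD_some] at hpre
    obtain ⟨nd, hbasic⟩ := hpre
    by_cases hemp : cfg.isEmpty
    · simp [hemp]
    · simp only [hemp, Bool.false_eq_true, if_false]
      rcases pv_sensitive_cases auth_type with ⟨hb, hs⟩ | hs | ⟨t, hs⟩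
      · -- basic: two pops
        have hord := hbasic hb
        unfold pvOrdOk at hord
        rw [hs]
        simp only [List.foldl_cons, List.foldl_nil]
        rw [pv_pop_spec _ _ _ nd, pv_pop_spec _ _ _ (pv_nodup_filter _ _ nd)]
        rw [List.filter_filter]
        have hcred2 : (cfg.filter (fun kv => !(kv.1 == "default_username"))).filter
              (fun kv => kv.1 == "default_password" && kv.2 != "")
            = cfg.filter (fun kv => kv.1 == "default_password" && kv.2 != "") := by
          rw [List.filter_filter]
          apply List.filter_congr
          intro x _
          by_cases hxp : x.1 = "default_password"
          · simp [hxp]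
          · simp [hxp]
        rw [hcred2]
        simp only [List.nil_append]
        rw [← pv_two_key_split "default_username" "default_password" (by decide) cfg hord]
        simp only [Prod.mk.injEq]
        constructor
        · apply List.filter_congr
          intro x _
          by_cases h1 : x.1 = "default_username" <;> by_cases h2 : x.1 = "default_password" <;>
            simp [h1, h2]
        · apply List.filter_congr
          intro x _
          by_cases h1 : x.1 = "default_username" <;> by_cases h2 : x.1 = "default_password" <;>
            simp [h1, h2]
      · rw [hs]; simp
      · rw [hs]
        simp only [List.foldl_cons, List.foldl_nil]
        rw [pv_pop_spec _ _ _ nd]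
        simp only [Prod.mk.injEq, List.nil_append]
        constructor
        · apply List.filter_congr; intro x _
          by_cases h : x.1 = t <;> simp [h]
        · apply List.filter_congr; intro x _
          by_cases h : x.1 = t <;> simp [h]
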